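-- pv_equiv track=rewrite | github.com/Rainexn0b/keyRGB | buildpython/steps/file_size_analysis/reporting.py | file_counts
-- ===== SOURCE A (Python) =====
-- from typing import Any
--
-- def file_counts(file_rows: list[dict[str, Any]]) -> dict[str, int]:
--     return {
--         "refactor": sum(1 for item in file_rows if item["bucket"] == "REFACTOR"),
--         "critical": sum(1 for item in file_rows if item["bucket"] == "CRITICAL"),
--         "severe": sum(1 for item in file_rows if item["bucket"] == "SEVERE"),
--         "extreme": sum(1 for item in file_rows if item["bucket"] == "EXTREME"),
--         "total": len(file_rows),
--     }
-- ===== SOURCE B (Python) =====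
-- def file_counts(file_rows: list) -> dict:
--     refactor = critical = severe = extreme = total = 0
--     for item in file_rows:
--         b = item["bucket"]
--         total += 1
--         if b == "REFACTOR":
--             refactor += 1
--         elif b == "CRITICAL":
--             critical += 1
--         elif b == "SEVERE":
--             severe += 1
--         elif b == "EXTREME":
--             extreme += 1
--     return {
--         "refactor": refactor,
--         "critical": critical,
--         "severe": severe,
--         "extreme": extreme,
--         "total": total,
--     }
-- ===== Notes on version B (the rewrite author's own statement) =====
-- stated objective: faster
-- what changed: Replaces A's four separate filtered-generator passes over file_rows with a single loop carrying five scalar counters (one branch chain per row, no dict comprehension passes).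
import Mathlib
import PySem

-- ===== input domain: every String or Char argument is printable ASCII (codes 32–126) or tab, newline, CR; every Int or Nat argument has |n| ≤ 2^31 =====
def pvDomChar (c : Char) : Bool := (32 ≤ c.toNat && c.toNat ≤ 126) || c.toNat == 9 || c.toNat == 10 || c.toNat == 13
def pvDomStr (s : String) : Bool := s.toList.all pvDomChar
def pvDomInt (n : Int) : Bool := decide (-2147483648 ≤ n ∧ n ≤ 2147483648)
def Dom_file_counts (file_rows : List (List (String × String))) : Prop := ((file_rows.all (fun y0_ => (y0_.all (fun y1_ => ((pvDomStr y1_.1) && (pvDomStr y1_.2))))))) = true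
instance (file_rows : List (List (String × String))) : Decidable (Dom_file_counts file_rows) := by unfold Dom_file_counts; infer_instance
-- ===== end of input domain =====

-- B replaces A's four filtered passes over file_rows with a single loop carrying five scalar counters.


-- ===== PORT A =====
-- item["bucket"] on a row: first-match lookup; none = KeyError (excluded by Pre_).
def bucketGet (row : List (String × String)) : Option String :=
  (PySem.Dict.mk row).get? "bucket"

-- sum(1 for item in file_rows if item["bucket"] == v)
def sumIf (file_rows : List (List (String × String))) (v : String) : Int :=
  file_rows.foldl (fun acc row => if bucketGet row = some v then acc + 1 else acc) 0

def file_counts (file_rows : List (List (String × String))) : List (String × Int) :=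
  [("refactor", sumIf file_rows "REFACTOR"),
   ("critical", sumIf file_rows "CRITICAL"),
   ("severe", sumIf file_rows "SEVERE"),
   ("extreme", sumIf file_rows "EXTREME"),
   ("total", (file_rows.length : Int))]

-- ===== PORT B =====
-- B's single loop, as structural recursion over the rows carrying the five counters.
-- 'b = item["bucket"]': first-match lookup; '.getD ""' only realises the Option (under
-- Pre_ it is always 'some'; outside Pre_ Python B raises KeyError like A).
def countLoop : List (List (String × String)) → Int × Int × Int × Int × Int → Int × Int × Int × Int × Int
  | [], st => st
  | row :: rest, (r, c, s, e, t) =>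
      let b := ((PySem.Dict.mk row).get? "bucket").getD ""
      countLoop rest
        (if b = "REFACTOR" then (r + 1, c, s, e, t + 1)
         else if b = "CRITICAL" then (r, c + 1, s, e, t + 1)
         else if b = "SEVERE" then (r, c, s + 1, e, t + 1)
         else if b = "EXTREME" then (r, c, s, e + 1, t + 1)
         else (r, c, s, e, t + 1))

def file_counts_alt (file_rows : List (List (String × String))) : List (String × Int) :=
  match countLoop file_rows (0, 0, 0, 0, 0) with
  | (r, c, s, e, t) =>
      [("refactor", r), ("critical", c), ("severe", s), ("extreme", e), ("total", t)]

-- ===== PRECONDITION & SPEC =====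
-- Pre_ excludes exactly the inputs where some row lacks the key "bucket": there both
-- Pythons raise KeyError (A in its first generator pass, B at item["bucket"]).
def Pre_file_counts (file_rows : List (List (String × String))) : Prop :=
  ∀ row ∈ file_rows, (PySem.Dict.mk row).contains "bucket" = true
instance (file_rows : List (List (String × String))) : Decidable (Pre_file_counts file_rows) := by unfold Pre_file_counts; infer_instance

def pvWitness_file_counts : (List (List (String × String))) :=
  [[("bucket", "REFACTOR")], [("bucket", "other"), ("x", "y")]]

def Spec_file_counts (file_rows : List (List (String × String))) (out : List (String × Int)) : Prop := out = file_counts_alt file_rows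
instance (file_rows : List (List (String × String))) (out : List (String × Int)) : Decidable (Spec_file_counts file_rows out) := by unfold Spec_file_counts; infer_instance

-- ===== CLAIM (what is proved, stated in full; the proofs are below) =====
def Claim_equal_file_counts : Prop := ∀ (file_rows : List (List (String × String))), Dom_file_counts file_rows → Pre_file_counts file_rows → Spec_file_counts file_rows (file_counts file_rows)

-- ===== LEMMAS AND PROOFS =====

-- A's filtered sum, generalized over the accumulator.
lemma sumIf_foldl (l : List (List (String × String))) (v : String) (acc : Int) :
    l.foldl (fun acc row => if bucketGet row = some v then acc + 1 else acc) acc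
      = acc + l.foldl (fun acc row => if bucketGet row = some v then acc + 1 else acc) 0 := by
  induction l generalizing acc with
  | nil => simp
  | cons r t ih =>
    simp only [List.foldl_cons]
    rw [ih, ih (if bucketGet r = some v then 0 + 1 else 0)]
    split_ifs <;> ring

lemma sumIf_cons (r : List (String × String)) (t : List (List (String × String))) (v : String) :
    sumIf (r :: t) v = (if bucketGet r = some v then (1 : Int) else 0) + sumIf t v := by
  unfold sumIf
  simp only [List.foldl_cons]
  rw [sumIf_foldl]
  split_ifs <;> simp

-- The loop invariant: B's counters end at their starting values plus A's filtered sums.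
lemma countLoop_invariant (l : List (List (String × String)))
    (h : ∀ row ∈ l, (PySem.Dict.mk row).contains "bucket" = true)
    (r c s e t : Int) :
    countLoop l (r, c, s, e, t)
      = (r + sumIf l "REFACTOR", c + sumIf l "CRITICAL", s + sumIf l "SEVERE",
         e + sumIf l "EXTREME", t + l.length) := by
  induction l generalizing r c s e t with
  | nil => simp [countLoop, sumIf]
  | cons row rest ih =>
    have hr : (PySem.Dict.mk row).contains "bucket" = true := h row (by simp)
    have hsome : ((PySem.Dict.mk row).get? "bucket").isSome := by
      simpa [PySem.Dict.contains_eq_isSome_get?] using hr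
    obtain ⟨b, hb⟩ := Option.isSome_iff_exists.mp hsome
    have hbg : bucketGet row = some b := hb
    simp only [countLoop, hb, Option.getD_some]
    split_ifs with h1 h2 h3 h4 <;>
      rw [ih (fun x hx => h x (List.mem_cons_of_mem _ hx))] <;>
      simp only [sumIf_cons, hbg, List.length_cons, Prod.mk.injEq, Option.some.injEq,
        h1, if_pos, Nat.cast_add, Nat.cast_one] <;>
      simp_all <;> omega

-- ===== VERDICT (by name: the statement is the Claim_ definition above) =====
theorem file_counts_spec : Claim_equal_file_counts := by
  intro file_rows _ hpre
  unfold Spec_file_counts file_counts file_counts_alt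
  rw [countLoop_invariant file_rows hpre]
  simp
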